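-- pv_equiv track=rewrite | github.com/AtharvGangwar48/Suart | social-intel-agent/src/analysis/image/religious_hate_detector.py | _extract_targets
-- ===== SOURCE A (Python) =====
-- def _extract_targets(hate_labels):
--     targets = []
--     if any('muslim' in l.lower() for l in hate_labels):
--         targets.append("Muslims")
--     if any('hindu' in l.lower() for l in hate_labels):
--         targets.append("Hindus")
--     if any('christian' in l.lower() for l in hate_labels):
--         targets.append("Christians")
--     if any('jewish' in l.lower() or 'jew' in l.lower() for l in hate_labels):
--         targets.append("Jews")
--     return targets
-- ===== SOURCE B (Python) =====
-- def _extract_targets(hate_labels):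
--     # One pass with four flags and an early break, instead of four full any() scans.
--     m = h = c = j = False
--     for l in hate_labels:
--         if m and h and c and j:
--             break
--         low = l.lower()
--         m = m or 'muslim' in low
--         h = h or 'hindu' in low
--         c = c or 'christian' in low
--         j = j or 'jew' in low
--     out = []
--     if m:
--         out.append("Muslims")
--     if h:
--         out.append("Hindus")
--     if c:
--         out.append("Christians")
--     if j:
--         out.append("Jews")
--     return out
-- ===== Notes on version B (the rewrite author's own statement) =====
-- stated objective: faster
-- what changed: Replaces four separate any() scans (each lowering every label again, and testing both 'jewish' and 'jew') with a single pass that lowers each label once, maintains four found-flags ('jew' alone subsumes 'jewish'), breaks early once all four are set, and emits the group names from the flags in fixed order.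
import Mathlib
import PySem

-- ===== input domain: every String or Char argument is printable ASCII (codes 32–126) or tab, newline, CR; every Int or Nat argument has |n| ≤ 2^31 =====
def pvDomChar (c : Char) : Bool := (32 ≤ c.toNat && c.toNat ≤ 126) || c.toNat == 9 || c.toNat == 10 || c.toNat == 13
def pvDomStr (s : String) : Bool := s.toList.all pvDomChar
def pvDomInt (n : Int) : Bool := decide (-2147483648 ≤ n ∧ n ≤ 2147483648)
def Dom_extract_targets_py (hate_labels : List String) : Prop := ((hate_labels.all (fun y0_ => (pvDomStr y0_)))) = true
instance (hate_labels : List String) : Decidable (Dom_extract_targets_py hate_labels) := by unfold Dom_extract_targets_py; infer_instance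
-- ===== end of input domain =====

-- B makes a single pass with four found-flags and an early break instead of A's four any() scans; same return value.

-- ===== PORT A =====
def extract_targets_py (hate_labels : List String) : List String :=
  let targets : List String := []
  let targets := if hate_labels.any (fun l => PySem.Str.isIn "muslim" (PySem.Str.lower l)) then targets ++ ["Muslims"] else targets
  let targets := if hate_labels.any (fun l => PySem.Str.isIn "hindu" (PySem.Str.lower l)) then targets ++ ["Hindus"] else targets
  let targets := if hate_labels.any (fun l => PySem.Str.isIn "christian" (PySem.Str.lower l)) then targets ++ ["Christians"] else targets
  let targets := if hate_labels.any (fun l => PySem.Str.isIn "jewish" (PySem.Str.lower l) || PySem.Str.isIn "jew" (PySem.Str.lower l)) then targets ++ ["Jews"] else targets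
  targets

-- ===== PORT B =====
-- the single-pass flag loop of Source B, with the 'all four found' early break at the loop top
def extractGo : List String → Bool → Bool → Bool → Bool → Bool × Bool × Bool × Bool
  | [], m, h, c, j => (m, h, c, j)
  | l :: rest, m, h, c, j =>
    if m && h && c && j then (m, h, c, j)
    else
      let low := PySem.Str.lower l
      extractGo rest (m || PySem.Str.isIn "muslim" low) (h || PySem.Str.isIn "hindu" low)
        (c || PySem.Str.isIn "christian" low) (j || PySem.Str.isIn "jew" low)

def extract_targets_py_alt (hate_labels : List String) : List String :=
  let r := extractGo hate_labels false false false false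
  (if r.1 then ["Muslims"] else []) ++ (if r.2.1 then ["Hindus"] else []) ++
    (if r.2.2.1 then ["Christians"] else []) ++ (if r.2.2.2 then ["Jews"] else [])

-- ===== PRECONDITION & SPEC =====
def Spec_extract_targets_py (hate_labels : List String) (out : List String) : Prop := out = extract_targets_py_alt hate_labels
instance (hate_labels : List String) (out : List String) : Decidable (Spec_extract_targets_py hate_labels out) := by unfold Spec_extract_targets_py; infer_instance

-- ===== CLAIM (what is proved, stated in full; the proofs are below) =====
def Claim_equal_extract_targets_py : Prop := ∀ (hate_labels : List String), Dom_extract_targets_py hate_labels → Spec_extract_targets_py hate_labels (extract_targets_py hate_labels)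

-- ===== LEMMAS AND PROOFS =====

-- the flag loop computes, flag by flag, 'initial flag OR some label matches'
theorem extractGo_eq (ls : List String) (m h c j : Bool) :
    extractGo ls m h c j =
      (m || ls.any (fun l => PySem.Str.isIn "muslim" (PySem.Str.lower l)),
       h || ls.any (fun l => PySem.Str.isIn "hindu" (PySem.Str.lower l)),
       c || ls.any (fun l => PySem.Str.isIn "christian" (PySem.Str.lower l)),
       j || ls.any (fun l => PySem.Str.isIn "jew" (PySem.Str.lower l))) := by
  induction ls generalizing m h c j with
  | nil => simp [extractGo]
  | cons l rest ih =>
    by_cases hall : (m && h && c && j) = true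
    · have hm : m = true := by simp_all
      have hh : h = true := by simp_all
      have hc : c = true := by simp_all
      have hj : j = true := by simp_all
      simp [extractGo, hm, hh, hc, hj]
    · simp only [extractGo, hall]
      rw [ih]
      simp [Bool.or_assoc]

-- a string containing "jewish" also contains "jew"
theorem jew_absorb (s : String) :
    (PySem.Str.isIn "jewish" s || PySem.Str.isIn "jew" s) = PySem.Str.isIn "jew" s := by
  cases hjew : PySem.Str.isIn "jew" s with
  | true => simp
  | false =>
    simp only [Bool.or_false]
    have hnot : ¬ ("jew".toList <:+: s.toList) := by
      simpa [PySem.Chars.isIn_eq_false_iff] using hjew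
    have hsub : ("jew".toList <:+: "jewish".toList) := by decide
    simp only [PySem.Str.isIn, PySem.Chars.isIn_eq_false_iff]
    intro hinf
    exact hnot (hsub.trans hinf)

-- ===== VERDICT (by name: the statement is the Claim_ definition above) =====
theorem extract_targets_py_spec : Claim_equal_extract_targets_py := by
  intro hate_labels _
  unfold Spec_extract_targets_py extract_targets_py extract_targets_py_alt
  rw [extractGo_eq]
  simp only [jew_absorb]
  simp only [Bool.false_or]
  split_ifs <;> rfl
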